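-- pv_equiv track=rewrite | github.com/reading-stiener/UMRP-audio-processing | video_processing.py | instrument_count
-- ===== SOURCE A (Python) =====
-- def instrument_count(filepath):
--     """
--     Counts instruments in a mix. Uses the URMP
--     file path naming convention.
--
--     Parameters
--     ----------
--
--     filepath : str
--         Mix piece file path folder.
--
--     Returns
--     -------
--
--     count : int
--         Number instruments in the piece.
--     """
--     instruments = [ '_vn', '_fl', '_tpt',
--                     '_cl', '_vc', '_sax',
--                     '_tba', '_va', '_tbn',
--                     '_bn', '_hn', '_db',
--                     '_ob' ]
--
--     count = 0
--     for inst in instruments: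
--         count =  count + filepath.count(inst)
--     return count
-- ===== SOURCE B (Python) =====
-- _CODES3 = ('_vn', '_fl', '_cl', '_vc', '_va', '_bn', '_hn', '_db', '_ob')
-- _CODES4 = ('_tpt', '_sax', '_tba', '_tbn')
--
--
-- def instrument_count(filepath):
--     # single left-to-right scan: every code begins with an underscore and has
--     # no other underscore, so matches never overlap and a position-wise scan
--     # equals the sum of the 13 .count() passes
--     count = 0
--     s = filepath
--     while s:
--         if s[0] == '_' and (s[:3] in _CODES3 or s[:4] in _CODES4):
--             count += 1
--         s = s[1:]
--     return count
-- ===== Notes on version B (the rewrite author's own statement) =====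
-- stated objective: alternative
-- what changed: Replaces A's 13 separate str.count scans of the whole path with a single left-to-right scan that tests, at each position, the length-3 and length-4 instrument codes; exact because every code begins with an underscore and contains no other underscore, so code occurrences never overlap.
import Mathlib
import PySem

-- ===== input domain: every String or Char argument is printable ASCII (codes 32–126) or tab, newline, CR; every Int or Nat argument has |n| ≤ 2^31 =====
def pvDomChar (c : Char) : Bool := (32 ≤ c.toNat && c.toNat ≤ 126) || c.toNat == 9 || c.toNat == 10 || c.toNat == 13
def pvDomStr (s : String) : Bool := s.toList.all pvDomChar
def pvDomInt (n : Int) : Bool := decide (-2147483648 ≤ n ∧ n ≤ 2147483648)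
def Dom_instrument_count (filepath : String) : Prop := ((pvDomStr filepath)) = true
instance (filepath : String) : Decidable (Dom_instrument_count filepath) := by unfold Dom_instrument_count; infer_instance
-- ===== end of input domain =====

-- B replaces A's 13 separate .count() scans by one single left-to-right scan of the string
-- that tests the codes of length 3 and of length 4 at each position (objective: alternative).

-- ===== PORT A =====
def instrument_count (filepath : String) : Int :=
  let instruments : List String :=
    [ "_vn", "_fl", "_tpt", "_cl", "_vc", "_sax", "_tba", "_va", "_tbn", "_bn", "_hn", "_db", "_ob" ]
  instruments.foldl (fun count inst => count + (PySem.Str.count filepath inst : Int)) 0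

-- ===== PORT B =====
def pvCodes3 : List (List Char) :=
  ["_vn".toList, "_fl".toList, "_cl".toList, "_vc".toList, "_va".toList,
   "_bn".toList, "_hn".toList, "_db".toList, "_ob".toList]
def pvCodes4 : List (List Char) :=
  ["_tpt".toList, "_sax".toList, "_tba".toList, "_tbn".toList]

-- the while loop over the successive suffixes s, s[1:], …; s[:3]/s[:4] with these
-- small non-negative bounds is exactly List.take 3 / List.take 4 on the char list
def pvAltGo (s : List Char) (count : Int) : Int :=
  match s with
  | [] => count
  | c :: t =>
      pvAltGo t (if c = '_' ∧ ((c :: t).take 3 ∈ pvCodes3 ∨ (c :: t).take 4 ∈ pvCodes4)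
                 then count + 1 else count)

def instrument_count_alt (filepath : String) : Int :=
  pvAltGo filepath.toList 0

-- ===== PRECONDITION & SPEC =====
def Spec_instrument_count (filepath : String) (out : Int) : Prop := out = instrument_count_alt filepath
instance (filepath : String) (out : Int) : Decidable (Spec_instrument_count filepath out) := by unfold Spec_instrument_count; infer_instance

-- ===== CLAIM (what is proved, stated in full; the proofs are below) =====
def Claim_equal_instrument_count : Prop := ∀ (filepath : String), Dom_instrument_count filepath → Spec_instrument_count filepath (instrument_count filepath)

-- ===== LEMMAS AND PROOFS =====

-- A's instrument list, as char lists, in A's order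
def pvAll : List (List Char) :=
  ["_vn".toList, "_fl".toList, "_tpt".toList, "_cl".toList, "_vc".toList, "_sax".toList,
   "_tba".toList, "_va".toList, "_tbn".toList, "_bn".toList, "_hn".toList, "_db".toList, "_ob".toList]

-- number of positions of cs at which w occurs (as a prefix of the suffix there)
def pvSuffCount (w : List Char) : List Char → Int
  | [] => 0
  | c :: t => (if w.isPrefixOf (c :: t) then 1 else 0) + pvSuffCount w t

theorem pvSuffCount_append_of_no_underscore (w : List Char) (hw : w.head? = some '_')
    (seg rest : List Char) (hseg : '_' ∉ seg) :
    pvSuffCount w (seg ++ rest) = pvSuffCount w rest := by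
  induction seg with
  | nil => rfl
  | cons d seg ih =>
      have hnp : w.isPrefixOf (d :: (seg ++ rest)) = false := by
        by_contra h
        have hpre : w <+: d :: (seg ++ rest) :=
          List.isPrefixOf_iff_prefix.mp (by revert h; cases w.isPrefixOf (d :: (seg ++ rest)) <;> simp)
        obtain ⟨r, hr⟩ := hpre
        cases w with
        | nil => simp at hw
        | cons a wt =>
            simp at hw
            have : a = d := by simpa using congrArg List.head? hr
            exact hseg (by rw [this] at hw; simp [hw])
      simp only [List.cons_append, pvSuffCount, hnp]
      simpa using ih (fun hc => hseg (by simp [hc]))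

theorem pvCountGo_eq (w : List Char) (hw : w.head? = some '_')
    (htail : '_' ∉ w.tail) :
    ∀ (fuel : Nat) (cs : List Char) (acc : Nat), cs.length ≤ fuel →
      (PySem.Chars.count.go w fuel cs acc : Int) = acc + pvSuffCount w cs := by
  intro fuel
  induction fuel with
  | zero =>
      intro cs acc hlen
      have : cs = [] := List.eq_nil_of_length_eq_zero (Nat.le_zero.mp hlen)
      subst this
      simp [PySem.Chars.count.go, pvSuffCount]
  | succ fuel ih =>
      intro cs acc hlen
      cases cs with
      | nil => simp [PySem.Chars.count.go, pvSuffCount]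
      | cons c t =>
          by_cases hp : w.isPrefixOf (c :: t) = true
          · have hpre : w <+: c :: t := List.isPrefixOf_iff_prefix.mp hp
            obtain ⟨r, hr⟩ := hpre
            cases w with
            | nil => simp at hw
            | cons a wt =>
                have hct : c :: t = a :: (wt ++ r) := by simpa using hr.symm
                have hc : c = a := by simpa using congrArg List.head? hct
                have ht : t = wt ++ r := by simpa [hc] using congrArg List.tail hct
                have hdrop : List.drop (a :: wt).length (c :: t) = r := by
                  rw [hct]; simp [List.drop_left']
                have hlenr : r.length ≤ fuel := by
                  have : t.length ≤ fuel := by simpa using hlen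
                  rw [ht] at this; simp at this; omega
                simp only [PySem.Chars.count.go, hp, if_true]
                rw [hdrop, ih r _ hlenr]
                have hsuff : pvSuffCount (a :: wt) t = pvSuffCount (a :: wt) r := by
                  rw [ht]
                  exact pvSuffCount_append_of_no_underscore _ hw _ _ (by simpa using htail)
                simp only [pvSuffCount, hp, if_true, hsuff]
                push_cast
                ring
          · have hp' : w.isPrefixOf (c :: t) = false := by
              revert hp; cases w.isPrefixOf (c :: t) <;> simp
            simp only [PySem.Chars.count.go, hp', Bool.false_eq_true, if_false]
            rw [ih t _ (by simpa using Nat.le_of_succ_le_succ (by simpa using hlen))]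
            simp [pvSuffCount, hp']

theorem pvCount_eq (w cs : List Char) (hw : w.head? = some '_')
    (htail : '_' ∉ w.tail) :
    (PySem.Chars.count cs w : Int) = pvSuffCount w cs := by
  have hne : w.isEmpty = false := by cases w <;> simp_all
  simp only [PySem.Chars.count, hne, Bool.false_eq_true, if_false]
  simpa using pvCountGo_eq w hw htail cs.length cs 0 (le_refl _)

theorem pvCountP_le_one {α : Type} (l : List α) (p : α → Bool)
    (h : ∀ a ∈ l, ∀ b ∈ l, p a → p b → a = b) (hnd : l.Nodup) : l.countP p ≤ 1 := by
  induction l with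
  | nil => simp
  | cons a l ih =>
      rw [List.countP_cons]
      by_cases hpa : p a = true
      · have hz : l.countP p = 0 := by
          rw [List.countP_eq_zero]
          intro b hb hpb
          exact (List.nodup_cons.mp hnd).1 (by rw [h b (by simp [hb]) a (by simp) hpb hpa] at hb; exact hb)
        simp [hz, hpa]
      · have hpa' : p a = false := by revert hpa; cases p a <;> simp
        have hrec := ih (fun x hx y hy => h x (by simp [hx]) y (by simp [hy])) (List.nodup_cons.mp hnd).2
        simp only [hpa', Bool.false_eq_true, if_false]
        omega

-- at most one code matches at a position, and B's test fires iff one does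
theorem pvKey (c : Char) (t : List Char) :
    (if c = '_' ∧ ((c :: t).take 3 ∈ pvCodes3 ∨ (c :: t).take 4 ∈ pvCodes4)
     then (1 : Int) else 0)
    = (pvAll.map (fun w => if w.isPrefixOf (c :: t) then (1 : Int) else 0)).sum := by
  rw [PySem.List.sum_map_ite_one_zero (fun w => w.isPrefixOf (c :: t)) pvAll]
  have huniq : ∀ a ∈ pvAll, ∀ b ∈ pvAll,
      a.isPrefixOf (c :: t) → b.isPrefixOf (c :: t) → a = b := by
    intro a ha b hb hpa hpb
    have h := List.prefix_or_prefix_of_prefix (List.isPrefixOf_iff_prefix.mp hpa)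
      (List.isPrefixOf_iff_prefix.mp hpb)
    have hpair : ∀ a ∈ pvAll, ∀ b ∈ pvAll, a <+: b → a = b := by decide
    rcases h with h | h
    · exact hpair a ha b hb h
    · exact (hpair b hb a ha h).symm
  have hiff : (c = '_' ∧ ((c :: t).take 3 ∈ pvCodes3 ∨ (c :: t).take 4 ∈ pvCodes4))
      ↔ ∃ w ∈ pvAll, w.isPrefixOf (c :: t) := by
    constructor
    · rintro ⟨-, h | h⟩
      · refine ⟨(c :: t).take 3, ?_, ?_⟩
        · have : ∀ w ∈ pvCodes3, w ∈ pvAll := by decide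
          exact this _ h
        · exact List.isPrefixOf_iff_prefix.mpr (List.take_prefix _ _)
      · refine ⟨(c :: t).take 4, ?_, ?_⟩
        · have : ∀ w ∈ pvCodes4, w ∈ pvAll := by decide
          exact this _ h
        · exact List.isPrefixOf_iff_prefix.mpr (List.take_prefix _ _)
    · rintro ⟨w, hmem, hpre⟩
      obtain ⟨r, hr⟩ := List.isPrefixOf_iff_prefix.mp hpre
      have hshape : ∀ w ∈ pvAll, w.head? = some '_' ∧
          ((w.length = 3 ∧ w ∈ pvCodes3) ∨ (w.length = 4 ∧ w ∈ pvCodes4)) := by decide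
      obtain ⟨hhead, hlen⟩ := hshape w hmem
      have hc : c = '_' := by
        cases w with
        | nil => simp at hhead
        | cons a wt =>
            have : a = c := by simpa using congrArg List.head? hr
            simp at hhead; rw [← this, hhead]
      have htake : (c :: t).take w.length = w := by rw [← hr]; exact List.take_left
      refine ⟨hc, ?_⟩
      rcases hlen with ⟨h3, hm3⟩ | ⟨h4, hm4⟩
      · exact Or.inl (by rw [← h3, htake]; exact hm3)
      · exact Or.inr (by rw [← h4, htake]; exact hm4)
  by_cases hcond : c = '_' ∧ ((c :: t).take 3 ∈ pvCodes3 ∨ (c :: t).take 4 ∈ pvCodes4)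
  · have hpos : 0 < pvAll.countP (fun w => w.isPrefixOf (c :: t)) :=
      List.countP_pos_iff.mpr (hiff.mp hcond)
    have hle : pvAll.countP (fun w => w.isPrefixOf (c :: t)) ≤ 1 :=
      pvCountP_le_one _ _ huniq (by decide)
    have h1 : pvAll.countP (fun w => w.isPrefixOf (c :: t)) = 1 := by omega
    rw [if_pos hcond, h1]
    norm_num
  · have hz : pvAll.countP (fun w => w.isPrefixOf (c :: t)) = 0 := by
      rw [List.countP_eq_zero]
      intro w hw hp
      exact hcond (hiff.mpr ⟨w, hw, hp⟩)
    rw [if_neg hcond, hz]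
    norm_num

theorem pvAltGo_eq (cs : List Char) :
    ∀ acc : Int, pvAltGo cs acc = acc + (pvAll.map (fun w => pvSuffCount w cs)).sum := by
  induction cs with
  | nil => intro acc; simp [pvAltGo, pvAll, pvSuffCount]
  | cons c t ih =>
      intro acc
      simp only [pvAltGo]
      rw [ih]
      have : (pvAll.map (fun w => pvSuffCount w (c :: t))).sum
          = (pvAll.map (fun w => if w.isPrefixOf (c :: t) then (1 : Int) else 0)).sum
            + (pvAll.map (fun w => pvSuffCount w t)).sum := by
        rw [← PySem.List.sum_map_add_int]
        simp [pvSuffCount]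
      rw [this, ← pvKey c t]
      split_ifs <;> ring

-- ===== VERDICT (by name: the statement is the Claim_ definition above) =====
theorem instrument_count_spec : Claim_equal_instrument_count := by
  unfold Claim_equal_instrument_count
  intro fp _
  unfold Spec_instrument_count instrument_count instrument_count_alt
  rw [PySem.List.foldl_add, pvAltGo_eq]
  have hshape : ∀ w ∈ pvAll, w.head? = some '_' ∧ '_' ∉ w.tail := by decide
  have : ∀ w ∈ pvAll, (PySem.Chars.count fp.toList w : Int) = pvSuffCount w fp.toList := by
    intro w hw
    exact pvCount_eq w fp.toList (hshape w hw).1 (hshape w hw).2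
  simp only [PySem.Str.count_eq]
  congr 1
  have hmap : ([ "_vn", "_fl", "_tpt", "_cl", "_vc", "_sax", "_tba", "_va", "_tbn", "_bn", "_hn", "_db", "_ob" ] : List String).map (fun inst => (PySem.Chars.count fp.toList inst.toList : Int))
      = pvAll.map (fun w => (PySem.Chars.count fp.toList w : Int)) := by
    simp only [pvAll, List.map_cons, List.map_nil]
  rw [hmap]
  exact congrArg List.sum (List.map_congr_left this)
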